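-- pv_equiv track=rewrite | github.com/johnstegink/Wikipedia-corpora | Wikidata.py | __read_from_to
-- ===== SOURCE A (Python) =====
-- def __read_from_to(lines):
--     """
--     returns a dictionary with a start position as a key and a tuple( start, end) as
--     value. The key is a string, the tuple contains two integers. It uses the
--     lines from the index as input and reads field 0 (the position)
--     :param lines:
--     :return:
--     """
--     current = ""
--     positions = []
--     for line in lines:
--         if len(line) == 3  and  line[0] != current:
--             current = line[0]
--             positions.append( current)
--     positions.append("0")
--
--     pos = {}
--     for i in range(0, len(positions) - 1):
--         pos[positions[i]] = ( int(positions[i]), int(positions[i+1]))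
--
--     return pos
-- ===== SOURCE B (Python) =====
-- def __read_from_to(lines):
--     """Single-pass version: maintains the previous distinct position and
--     writes each (start, end) range on the fly instead of building the
--     intermediate positions list first."""
--     pos = {}
--     current = ""
--     prev = None
--     for line in lines:
--         if len(line) == 3 and line[0] != current:
--             current = line[0]
--             if prev is not None:
--                 pos[prev] = (int(prev), int(current))
--             prev = current
--     if prev is not None:
--         pos[prev] = (int(prev), 0)
--     return pos
-- ===== Notes on version B (the rewrite author's own statement) =====
-- stated objective: simpler
-- what changed: B replaces A's two sequential phases (build a distinct-consecutive positions list plus a '0' sentinel, then an index loop pairing positions[i] with positions[i+1]) by a single pass that keeps only the previous distinct position and writes each (start,end) range into the dict on the fly, with one final (prev,0) write; the intermediate list and the index arithmetic disappear.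
import Mathlib
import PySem

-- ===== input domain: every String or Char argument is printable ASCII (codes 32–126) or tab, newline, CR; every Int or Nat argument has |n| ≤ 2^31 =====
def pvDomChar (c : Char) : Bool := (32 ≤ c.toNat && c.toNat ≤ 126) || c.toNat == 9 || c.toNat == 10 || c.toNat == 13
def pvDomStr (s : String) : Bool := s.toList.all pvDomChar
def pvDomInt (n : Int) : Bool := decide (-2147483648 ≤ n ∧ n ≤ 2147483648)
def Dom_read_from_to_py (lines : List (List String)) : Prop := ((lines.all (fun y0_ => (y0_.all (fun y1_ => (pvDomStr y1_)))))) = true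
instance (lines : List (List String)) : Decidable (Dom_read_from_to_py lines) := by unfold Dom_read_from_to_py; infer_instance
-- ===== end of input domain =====

-- B is a single pass that writes each (start,end) range on the fly instead of A's
-- two phases (collect a positions list, then pair consecutive entries): simpler, same cost.

-- int(s); total stand-in, used only where Pre_ guarantees the string parses
def pvInt (s : String) : Int := (PySem.Int.ofStr? s).getD 0

-- ===== PORT A =====
-- loop body of A's first for-loop; state = (current, positions)
def stepA (st : String × List String) (line : List String) : String × List String :=
  if line.length = 3 ∧ line.getD 0 "" ≠ st.1 then (line.getD 0 "", st.2 ++ [line.getD 0 ""]) else st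

def read_from_to_py (lines : List (List String)) : List (String × Int × Int) :=
  let st := lines.foldl stepA ("", [])
  let positions := st.2 ++ ["0"]
  ((List.range (positions.length - 1)).foldl
    (fun pos i => pos.insert (positions.getD i "") (pvInt (positions.getD i ""), pvInt (positions.getD (i+1) "")))
    PySem.Dict.empty).items

-- ===== PORT B =====
-- loop body of B's single pass; state = (pos, current, prev)
def stepB (st : PySem.Dict String (Int × Int) × String × Option String) (line : List String) :
    PySem.Dict String (Int × Int) × String × Option String :=
  if line.length = 3 ∧ line.getD 0 "" ≠ st.2.1 then
    ((match st.2.2 with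
      | some p => st.1.insert p (pvInt p, pvInt (line.getD 0 ""))
      | none => st.1), line.getD 0 "", some (line.getD 0 ""))
  else st

def read_from_to_py_alt (lines : List (List String)) : List (String × Int × Int) :=
  let st := lines.foldl stepB (PySem.Dict.empty, "", none)
  (match st.2.2 with
   | some p => st.1.insert p (pvInt p, 0)
   | none => st.1).items

-- ===== PRECONDITION & SPEC =====
-- Pre_ holds exactly where Python's int() never raises: among the field-0 values of the
-- 3-field lines, every one after the leading run of empty strings must parse as an int
-- (A collects exactly those; leading "" fields are never collected since current starts "").
def Pre_read_from_to_py (lines : List (List String)) : Prop :=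
  (((lines.filter (fun l => l.length == 3)).map (fun l => l.getD 0 "")).dropWhile
    (fun s => s == "")).all (fun s => (PySem.Int.ofStr? s).isSome) = true
instance (lines : List (List String)) : Decidable (Pre_read_from_to_py lines) := by
  unfold Pre_read_from_to_py; infer_instance

def pvWitness_read_from_to_py : List (List String) :=
  [["1", "a", "b"], ["2", "c", "d"], ["x"], ["1", "e", "f"]]

def Spec_read_from_to_py (lines : List (List String)) (out : List (String × Int × Int)) : Prop := out = read_from_to_py_alt lines
instance (lines : List (List String)) (out : List (String × Int × Int)) : Decidable (Spec_read_from_to_py lines out) := by unfold Spec_read_from_to_py; infer_instance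

-- ===== CLAIM (what is proved, stated in full; the proofs are below) =====
def Claim_equal_read_from_to_py : Prop := ∀ (lines : List (List String)), Dom_read_from_to_py lines → Pre_read_from_to_py lines → Spec_read_from_to_py lines (read_from_to_py lines)

-- ===== LEMMAS AND PROOFS =====

-- the list of distinct-consecutive field-0 values A collects, starting from `c`
def collect : List (List String) → String → List String
  | [], _ => []
  | l :: ls, c =>
    if l.length = 3 ∧ l.getD 0 "" ≠ c then l.getD 0 "" :: collect ls (l.getD 0 "") else collect ls c

-- inserting (q[i], (int q[i], int q[i+1])) for each consecutive pair of q
def pairFold : List String → PySem.Dict String (Int × Int) → PySem.Dict String (Int × Int)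
  | [], d => d
  | [_], d => d
  | x :: y :: t, d => pairFold (y :: t) (d.insert x (pvInt x, pvInt y))

theorem foldl_stepA (ls : List (List String)) (c : String) (acc : List String) :
    (ls.foldl stepA (c, acc)).2 = acc ++ collect ls c := by
  induction ls generalizing c acc with
  | nil => simp [collect]
  | cons l t ih =>
    simp only [List.foldl_cons, collect]
    dsimp only [stepA]
    by_cases h : l.length = 3 ∧ l.getD 0 "" ≠ c
    · rw [if_pos h, if_pos h, ih]
      simp
    · rw [if_neg h, if_neg h, ih]

theorem range_fold_eq_pairFold (q : List String) (d : PySem.Dict String (Int × Int)) :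
    (List.range (q.length - 1)).foldl
      (fun pos i => pos.insert (q.getD i "") (pvInt (q.getD i ""), pvInt (q.getD (i + 1) ""))) d
      = pairFold q d := by
  induction q generalizing d with
  | nil => simp [pairFold]
  | cons x t ih =>
    cases t with
    | nil => simp [pairFold]
    | cons y t' =>
      have hlen : (x :: y :: t').length - 1 = (y :: t').length := by simp
      rw [hlen]
      have : (y :: t').length = (y :: t').length - 1 + 1 := by simp
      rw [this, List.range_succ_eq_map, List.foldl_cons, List.foldl_map]
      simp only [List.getD_cons_zero, List.getD_cons_succ]
      exact ih _

-- B's loop invariant: finishing B's state after processing `ls` equals pairFold over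
-- prev (if any) followed by what A would still collect, closed with the "0" sentinel.
theorem foldl_stepB (ls : List (List String)) (d : PySem.Dict String (Int × Int))
    (c : String) (p : Option String) :
    (match (ls.foldl stepB (d, c, p)).2.2 with
     | some x => (ls.foldl stepB (d, c, p)).1.insert x (pvInt x, 0)
     | none => (ls.foldl stepB (d, c, p)).1)
    = pairFold ((match p with | some x => x :: collect ls c | none => collect ls c) ++ ["0"]) d := by
  induction ls generalizing d c p with
  | nil =>
    cases p with
    | none => simp [collect, pairFold]
    | some x =>
      have h0 : pvInt "0" = 0 := by decide
      simp [collect, pairFold, h0]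
  | cons l t ih =>
    cases p with
    | none =>
      simp only [List.foldl_cons, collect]
      dsimp only [stepB]
      by_cases h : l.length = 3 ∧ l.getD 0 "" ≠ c
      · rw [if_pos h, if_pos h, ih]
      · rw [if_neg h, if_neg h, ih]
    | some x =>
      simp only [List.foldl_cons, collect]
      dsimp only [stepB]
      by_cases h : l.length = 3 ∧ l.getD 0 "" ≠ c
      · rw [if_pos h, if_pos h, ih]
        simp [pairFold]
      · rw [if_neg h, if_neg h, ih]

theorem ports_agree (lines : List (List String)) :
    read_from_to_py lines = read_from_to_py_alt lines := by
  simp only [read_from_to_py, read_from_to_py_alt]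
  rw [foldl_stepA lines "" [], List.nil_append, range_fold_eq_pairFold]
  rw [foldl_stepB lines PySem.Dict.empty "" none]

-- ===== VERDICT (by name: the statement is the Claim_ definition above) =====
theorem read_from_to_py_spec : Claim_equal_read_from_to_py := by
  intro lines _ _
  unfold Spec_read_from_to_py
  exact ports_agree lines
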